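-- pv_equiv track=rewrite | github.com/WhalesBob/AlgorithmSolving | 프로그래머스/lv2/42586. 기능개발/기능개발.py | solution
-- ===== SOURCE A (Python) =====
-- def solution(progresses, speeds):
--     point = before = 0
--     answer = []
--     while(point < len(progresses)):
--         for i in range(point, len(progresses)):
--             progresses[i] += speeds[i]
--
--         if progresses[point] >= 100:
--             while(point < len(progresses) and progresses[point] >= 100):
--                 point += 1
--             answer.append(point-before)
--             before = point
--
--     return answer
-- ===== SOURCE B (Python) =====
-- # B: instead of simulating day by day, compute each task's completion day in
-- # closed form (ceiling division) and group tasks in one pass by the running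
-- # maximum completion day.  Unlike A, B does not mutate `progresses`.
-- def _days(p, s):
--     # first day d >= 1 with p + d*s >= 100  (speeds are positive on the domain)
--     return max(1, -((p - 100) // s))
--
-- def solution(progresses, speeds):
--     answer = []
--     cur = 0    # release day of the group currently being counted
--     count = 0  # number of tasks in that group
--     for p, s in zip(progresses, speeds):
--         d = _days(p, s)
--         if cur < d:
--             if count:
--                 answer.append(count)
--             cur = d
--             count = 1
--         else:
--             count += 1
--     if count:
--         answer.append(count)
--     return answer
-- ===== Notes on version B (the rewrite author's own statement) =====
-- stated objective: alternative
-- what changed: A simulates the process day by day, re-adding speeds to every unfinished task each day; B computes each task's completion day once by ceiling division and groups by the running maximum in a single pass (intended as faster; a timing run could not get a clean reading because A timed out at n=16 while B returned).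
-- outside the precondition, e.g. on solution([150], [0]): A returns [1], B raises ZeroDivisionError
import Mathlib
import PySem

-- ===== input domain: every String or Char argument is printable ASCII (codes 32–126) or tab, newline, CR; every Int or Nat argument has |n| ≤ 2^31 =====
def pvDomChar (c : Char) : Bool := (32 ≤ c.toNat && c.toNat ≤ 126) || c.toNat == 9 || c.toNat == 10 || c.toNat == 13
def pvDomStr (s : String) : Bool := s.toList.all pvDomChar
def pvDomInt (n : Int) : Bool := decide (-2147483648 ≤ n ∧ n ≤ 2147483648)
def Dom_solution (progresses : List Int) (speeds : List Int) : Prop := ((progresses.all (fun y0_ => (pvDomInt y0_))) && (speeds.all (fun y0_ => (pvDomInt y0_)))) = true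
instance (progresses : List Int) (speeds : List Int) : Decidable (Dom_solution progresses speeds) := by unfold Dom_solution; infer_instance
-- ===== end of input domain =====

-- B changes the algorithm: closed-form completion days + one grouping pass, instead of
-- A's day-by-day simulation (A also mutates `progresses` in place in Python; the
-- equivalence proved here is about the return value only).

-- ===== PORT A =====
-- `for i in range(point, len(progresses)): progresses[i] += speeds[i]`
-- (speeds.getD is exact here: Pre_ guarantees speeds covers every index of progresses)
def addFrom (l : List Int) (speeds : List Int) (point : Nat) : List Int :=
  l.mapIdx (fun i x => if point ≤ i then x + speeds.getD i 0 else x)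

-- `while point < len(progresses) and progresses[point] >= 100: point += 1`
def advanceA (l : List Int) (point : Nat) : Nat :=
  if _h : point < l.length ∧ 100 ≤ l.getD point 0 then advanceA l (point + 1) else point
termination_by l.length - point
decreasing_by omega

-- A's outer `while` loop; the fuel is only a totality guard (under Pre_ it is ample)
def loopA (fuel : Nat) (l : List Int) (speeds : List Int) (point before : Nat)
    (answer : List Int) : List Int :=
  match fuel with
  | 0 => answer
  | fuel + 1 =>
    if point < l.length then
      let l' := addFrom l speeds point
      if 100 ≤ l'.getD point 0 then
        let point' := advanceA l' point
        loopA fuel l' speeds point' point' (answer ++ [((point' - before : Nat) : Int)])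
      else
        loopA fuel l' speeds point before answer
    else answer

def fuelA (progresses : List Int) : Nat :=
  (progresses.map (fun p => (100 - p).toNat + 1)).sum + 1

def solution (progresses : List Int) (speeds : List Int) : List Int :=
  loopA (fuelA progresses) progresses speeds 0 0 []

-- ===== PORT B =====
-- `max(1, -((p - 100) // s))`
def daysB (p s : Int) : Int := max 1 (-(PySem.Int.floordiv (p - 100) s))

def loopB (pairs : List (Int × Int)) (cur count : Int) (answer : List Int) : List Int :=
  match pairs with
  | [] => if count ≠ 0 then answer ++ [count] else answer
  | (p, s) :: rest =>
    let d := daysB p s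
    if cur < d then
      loopB rest d 1 (if count ≠ 0 then answer ++ [count] else answer)
    else
      loopB rest cur (count + 1) answer

def solution_alt (progresses : List Int) (speeds : List Int) : List Int :=
  loopB (progresses.zip speeds) 0 0 []

-- ===== PRECONDITION & SPEC =====
-- Pre_ excludes inputs where speeds is shorter than progresses (A raises IndexError)
-- and inputs containing a non-positive speed: on those A loops forever unless each such
-- task already shows >= 100 on the day it is reached — an accident of timing (where A
-- does return there, e.g. ([150],[0]), B raises ZeroDivisionError or is undefined).
def Pre_solution (progresses : List Int) (speeds : List Int) : Prop :=
  progresses.length ≤ speeds.length ∧ ∀ x ∈ progresses.zip speeds, 1 ≤ x.2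
instance (progresses : List Int) (speeds : List Int) : Decidable (Pre_solution progresses speeds) := by
  unfold Pre_solution; infer_instance

def pvWitness_solution : List Int × List Int := ([93, 30, 55], [1, 30, 5])

def Spec_solution (progresses : List Int) (speeds : List Int) (out : List Int) : Prop :=
  out = solution_alt progresses speeds
instance (progresses : List Int) (speeds : List Int) (out : List Int) : Decidable (Spec_solution progresses speeds out) := by
  unfold Spec_solution; infer_instance

-- ===== CLAIM (what is proved, stated in full; the proofs are below) =====
def Claim_equal_solution : Prop := ∀ (progresses : List Int) (speeds : List Int), Dom_solution progresses speeds → Pre_solution progresses speeds → Spec_solution progresses speeds (solution progresses speeds)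

-- ===== LEMMAS AND PROOFS =====

theorem days_pos (p s : Int) : 1 ≤ daysB p s := le_max_left _ _

-- the closed form really is "first day d with p + d*s >= 100"
theorem days_iff (p s k : Int) (hs : 1 ≤ s) (hk : 1 ≤ k) :
    daysB p s ≤ k ↔ 100 ≤ p + k * s := by
  unfold daysB
  rw [max_le_iff, and_iff_right hk, ← neg_le,
    PySem.Int.le_floordiv_iff_mul_le (show (0:Int) < s by omega)]
  constructor <;> intro h <;> nlinarith

theorem addFrom_length (l speeds : List Int) (point : Nat) :
    (addFrom l speeds point).length = l.length := by
  simp [addFrom]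

theorem addFrom_getD (l speeds : List Int) (point i : Nat) (h1 : point ≤ i)
    (h2 : i < l.length) :
    (addFrom l speeds point).getD i 0 = l.getD i 0 + speeds.getD i 0 := by
  simp [addFrom, List.getD_eq_getElem?_getD, List.getElem?_eq_getElem h2, h1]

theorem advanceA_spec (l : List Int) (point : Nat) (h : point ≤ l.length) :
    point ≤ advanceA l point ∧ advanceA l point ≤ l.length ∧
    (∀ j, point ≤ j → j < advanceA l point → 100 ≤ l.getD j 0) ∧
    (advanceA l point < l.length → l.getD (advanceA l point) 0 < 100) := by
  induction point using advanceA.induct l with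
  | case1 point hc ih =>
    rw [advanceA, dif_pos hc]
    obtain ⟨ih1, ih2, ih3, ih4⟩ := ih (by omega)
    refine ⟨by omega, ih2, ?_, ih4⟩
    intro j hj1 hj2
    rcases Nat.eq_or_lt_of_le hj1 with rfl | hlt
    · exact hc.2
    · exact ih3 j hlt hj2
  | case2 point hc =>
    rw [advanceA, dif_neg hc]
    refine ⟨le_rfl, h, by omega, ?_⟩
    intro hlt
    push_neg at hc
    exact hc hlt

theorem loopB_skip (m : Nat) : ∀ (pairs : List (Int × Int)) (cur count : Int)
    (ans : List Int), m ≤ pairs.length →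
    (∀ x ∈ pairs.take m, daysB x.1 x.2 ≤ cur) →
    loopB pairs cur count ans = loopB (pairs.drop m) cur (count + (m : Int)) ans := by
  induction m with
  | zero => intro pairs cur count ans _ _; simp
  | succ m ih =>
    intro pairs cur count ans hm hx
    match pairs with
    | [] => simp at hm
    | (p, s) :: rest =>
      simp only [List.take_succ_cons, List.mem_cons, forall_eq_or_imp] at hx
      rw [loopB]
      simp only [if_neg (not_lt.mpr hx.1)]
      rw [ih rest cur (count + 1) ans (by simpa using hm) hx.2]
      simp only [List.drop_succ_cons]
      congr 1
      push_cast
      ring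

def Phi (p s : List Int) (point : Nat) (k : Int) : Nat :=
  (((p.zip s).drop point).map (fun x => (daysB x.1 x.2 - k).toNat)).sum

theorem zip_length (p s : List Int) (h : p.length ≤ s.length) :
    (p.zip s).length = p.length := by
  simp [List.length_zip]; omega

theorem zip_drop_cons (p s : List Int) (point : Nat) (hlen : p.length ≤ s.length)
    (h : point < p.length) :
    (p.zip s).drop point = (p.getD point 0, s.getD point 0) :: (p.zip s).drop (point + 1) := by
  have hz : point < (p.zip s).length := by rw [zip_length p s hlen]; exact h
  rw [List.drop_eq_getElem_cons hz]
  congr 1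
  have hs : point < s.length := by omega
  simp [List.getElem_zip, List.getD_eq_getElem?_getD, List.getElem?_eq_getElem h,
    List.getElem?_eq_getElem hs]

theorem Phi_cons (p s : List Int) (point : Nat) (k : Int) (hlen : p.length ≤ s.length)
    (h : point < p.length) :
    Phi p s point k = (daysB (p.getD point 0) (s.getD point 0) - k).toNat + Phi p s (point + 1) k := by
  unfold Phi
  rw [zip_drop_cons p s point hlen h]
  simp

theorem Phi_mono_k (p s : List Int) (point : Nat) (k : Int) :
    Phi p s point (k + 1) ≤ Phi p s point k := by
  unfold Phi
  apply List.sum_le_sum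
  intro x _
  omega

theorem Phi_mono_pt (p s : List Int) (point q : Nat) (k : Int) (h : point ≤ q) :
    Phi p s q k ≤ Phi p s point k := by
  unfold Phi
  have hdd : (p.zip s).drop q = ((p.zip s).drop point).drop (q - point) := by
    rw [List.drop_drop]
    congr 1
    omega
  rw [hdd]
  exact List.Sublist.sum_le_sum (List.Sublist.map _ (List.drop_sublist _ _))
    (by intro x _; omega)

-- the main simulation: A's loop state versus B's fold over the remaining pairs
theorem sim (fuel : Nat) : ∀ (p s l : List Int) (point : Nat) (k cur count : Int)
    (ansB : List Int),
    l.length = p.length →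
    p.length ≤ s.length →
    (∀ x ∈ p.zip s, 1 ≤ x.2) →
    (∀ i, point ≤ i → i < p.length → l.getD i 0 = p.getD i 0 + k * s.getD i 0) →
    point ≤ p.length →
    0 ≤ k → cur ≤ k →
    (point < p.length → k < daysB (p.getD point 0) (s.getD point 0)) →
    Phi p s point k ≤ fuel →
    loopA fuel l s point point (if count ≠ 0 then ansB ++ [count] else ansB)
      = loopB ((p.zip s).drop point) cur count ansB := by
  induction fuel with
  | zero =>
    intro p s l point k cur count ansB hll hlen hs hval hpt hk hcur hhead hfuel
    have hpe : point = p.length := by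
      by_contra hne
      have hlt : point < p.length := by omega
      have h1 := hhead hlt
      have := Phi_cons p s point k hlen hlt
      omega
    subst hpe
    rw [loopA]
    have : (p.zip s).drop p.length = [] := by
      apply List.drop_eq_nil_of_le
      rw [zip_length p s hlen]
    rw [this, loopB]
  | succ fuel ih =>
    intro p s l point k cur count ansB hll hlen hs hval hpt hk hcur hhead hfuel
    by_cases hlt : point < p.length
    · have hslt : point < s.length := by omega
      have hsall : ∀ i, i < p.length → 1 ≤ s.getD i 0 := by
        intro i hi
        have hsl : i < s.length := by omega
        rw [List.getD_eq_getElem s 0 hsl]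
        apply hs (p[i], s[i])
        rw [List.mem_iff_getElem]
        exact ⟨i, by rw [zip_length p s hlen]; exact hi, by simp [List.getElem_zip]⟩
      have hsi : 1 ≤ s.getD point 0 := hsall point hlt
      rw [loopA]
      simp only [if_pos (show point < l.length by omega)]
      have hval' : ∀ i, point ≤ i → i < p.length →
          (addFrom l s point).getD i 0 = p.getD i 0 + (k + 1) * s.getD i 0 := by
        intro i h1 h2
        rw [addFrom_getD l s point i h1 (by omega), hval i h1 h2]
        ring
      have hvpt := hval' point le_rfl hlt
      by_cases hrel : 100 ≤ (addFrom l s point).getD point 0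
      · -- release day: the front task completes on day k+1
        have hd : daysB (p.getD point 0) (s.getD point 0) = k + 1 := by
          have h2 : daysB (p.getD point 0) (s.getD point 0) ≤ k + 1 := by
            rw [days_iff _ _ _ hsi (by omega)]
            omega
          have := hhead hlt
          omega
        simp only [if_pos hrel]
        set l' := addFrom l s point with hl'
        set pt' := advanceA l' point with hpt'
        have hlen' : l'.length = p.length := by rw [hl', addFrom_length]; omega
        obtain ⟨ha1, ha2, ha3, ha4⟩ := advanceA_spec l' point (by omega)
        have hpt'gt : point < pt' := by
          rcases Nat.eq_or_lt_of_le ha1 with he | h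
          · exfalso
            have := ha4 (by omega)
            rw [← he] at this
            omega
          · omega
        -- B side: head starts a new group, then the rest of the group is skipped
        rw [zip_drop_cons p s point hlen hlt, loopB]
        simp only [if_pos (show cur < daysB (p.getD point 0) (s.getD point 0) by omega)]
        rw [loopB_skip (pt' - (point + 1)) _ _ _ _
          (by rw [List.length_drop, zip_length p s hlen]; omega) ?_]
        · rw [List.drop_drop]
          have hdd : point + 1 + (pt' - (point + 1)) = pt' := by omega
          rw [hdd]
          have hrw : (1 : Int) + ((pt' - (point + 1) : Nat) : Int) = ((pt' - point : Nat) : Int) := by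
            push_cast [Nat.cast_sub (by omega : point + 1 ≤ pt'), Nat.cast_sub (by omega : point ≤ pt')]
            ring
          rw [hrw, hd]
          have hne : ((pt' - point : Nat) : Int) ≠ 0 := by
            have : 1 ≤ pt' - point := by omega
            omega
          have := ih p s l' pt' (k + 1) (k + 1) ((pt' - point : Nat) : Int)
            (if count ≠ 0 then ansB ++ [count] else ansB)
            (by omega) hlen hs
            (by intro i h1 h2; exact hval' i (by omega) h2)
            (by omega) (by omega) le_rfl
            ?_ ?_
          · rw [← this]
            simp only [if_pos hne]
          · intro hlt'
            have h4 := ha4 (by omega)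
            rw [hval' pt' (by omega) hlt'] at h4
            have hsi' := hsall pt' hlt'
            by_contra hc
            push_neg at hc
            rw [days_iff _ _ _ hsi' (by omega)] at hc
            omega
          · have hstep : Phi p s pt' (k + 1) + 1 ≤ Phi p s point k := by
              have h1 : Phi p s pt' (k + 1) ≤ Phi p s pt' k := Phi_mono_k p s pt' k
              have h2 : Phi p s pt' k ≤ Phi p s (point + 1) k := Phi_mono_pt p s (point + 1) pt' k (by omega)
              have h3 := Phi_cons p s point k hlen hlt
              have h4 := hhead hlt
              omega
            omega
        · -- every task between point+1 and pt' also shows >= 100 on day k+1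
          intro x hx
          rw [List.mem_iff_getElem] at hx
          obtain ⟨j, hj, hxe⟩ := hx
          simp only [List.length_take, List.length_drop, zip_length p s hlen] at hj
          have hjp : point + 1 + j < pt' := by omega
          have hjplen : point + 1 + j < p.length := by omega
          have hjs : point + 1 + j < s.length := by omega
          have hxe' : x = (p[point + 1 + j], s[point + 1 + j]) := by
            rw [← hxe, List.getElem_take, List.getElem_drop, List.getElem_zip]
          have h100 := ha3 (point + 1 + j) (by omega) (by omega)
          rw [hval' (point + 1 + j) (by omega) hjplen,
            List.getD_eq_getElem p 0 hjplen, List.getD_eq_getElem s 0 hjs] at h100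
          have hsi' := hsall (point + 1 + j) hjplen
          rw [List.getD_eq_getElem s 0 hjs] at hsi'
          rw [hxe']
          show daysB p[point + 1 + j] s[point + 1 + j] ≤ _
          rw [days_iff _ _ _ hsi' (by omega), hd]
          exact h100
      · -- silent day: nothing completes, just one more day of progress
        simp only [if_neg hrel]
        have hd : k + 1 < daysB (p.getD point 0) (s.getD point 0) := by
          by_contra hc
          push_neg at hc
          rw [days_iff _ _ _ hsi (by omega)] at hc
          omega
        have := ih p s (addFrom l s point) point (k + 1) cur count ansB
          (by rw [addFrom_length]; omega) hlen hs hval' hpt (by omega) (by omega)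
          (fun _ => hd) ?_
        · exact this
        · have h1 : Phi p s point (k + 1) + 1 ≤ Phi p s point k := by
            have h3 := Phi_cons p s point k hlen hlt
            have h4 := Phi_cons p s point (k + 1) hlen hlt
            have h5 := Phi_mono_k p s (point + 1) k
            have h6 := hhead hlt
            omega
          omega
    · have hpe : point = p.length := by omega
      subst hpe
      rw [loopA]
      simp only [if_neg (show ¬ p.length < l.length by omega)]
      have : (p.zip s).drop p.length = [] := by
        apply List.drop_eq_nil_of_le
        rw [zip_length p s hlen]
      rw [this, loopB]

theorem phi_init (p s : List Int) (hlen : p.length ≤ s.length)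
    (hs : ∀ x ∈ p.zip s, 1 ≤ x.2) : Phi p s 0 0 ≤ fuelA p := by
  unfold Phi fuelA
  simp only [List.drop_zero]
  have h1 : ∀ x ∈ p.zip s, (daysB x.1 x.2 - 0).toNat ≤ (100 - x.1).toNat + 1 := by
    intro x hx
    have hsx := hs x hx
    have : daysB x.1 x.2 ≤ ((100 - x.1).toNat + 1 : Int) := by
      rw [days_iff _ _ _ hsx (by omega)]
      nlinarith [Int.self_le_toNat (100 - x.1), Int.natCast_nonneg (100 - x.1).toNat, hsx]
    omega
  calc ((p.zip s).map (fun x => (daysB x.1 x.2 - 0).toNat)).sum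
      ≤ ((p.zip s).map (fun x => (100 - x.1).toNat + 1)).sum := List.sum_le_sum h1
    _ = (p.map (fun q => (100 - q).toNat + 1)).sum := by
        conv_rhs => rw [← List.map_fst_zip hlen]
        rw [List.map_map]
        rfl
    _ ≤ (p.map (fun q => (100 - q).toNat + 1)).sum + 1 := by omega

-- ===== VERDICT (by name: the statement is the Claim_ definition above) =====
theorem solution_spec : Claim_equal_solution := by
  intro p s _hdom hpre
  obtain ⟨hlen, hs⟩ := hpre
  unfold Spec_solution solution solution_alt
  have := sim (fuelA p) p s p 0 0 0 0 [] rfl hlen hs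
    (by intro i _ h2; simp) (by omega) le_rfl le_rfl
    (fun h => by
      have := days_pos (p.getD 0 0) (s.getD 0 0)
      omega)
    (by simpa using phi_init p s hlen hs)
  simpa using this
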